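-- pv_equiv track=rewrite | github.com/UTAS-Programming-Club/UntitledTextAdventure | frontends/picovisionhelpers.py | GetTextHeight
-- ===== SOURCE A (Python) =====
-- def GetTextHeight(text: str) -> int:
--   height: int = 0
--   lines: list[str] = text.split("\n")
--
--   for line in lines:
--       if line == "":
--           height += 35
--       else:
--           height += 25
--
--   return height
-- ===== SOURCE B (Python) =====
-- def GetTextHeight(text: str) -> int:
--   # Single character-level scan: no split, no list of lines.
--   # Every line starts assumed empty (worth 35); the first non-newline
--   # character of a line downgrades it to 25 (i.e. subtracts 10).
--   height = 35        # the first (so far empty) line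
--   line_empty = True
--   for ch in text:
--       if ch == "\n":
--           height += 35   # a new line begins, assumed empty
--           line_empty = True
--       elif line_empty:
--           height -= 10   # current line turned out non-empty
--           line_empty = False
--   return height
-- ===== Notes on version B (the rewrite author's own statement) =====
-- stated objective: alternative
-- what changed: Replaces split-into-lines plus a per-line branching loop by a single character-level state machine that never materialises the line list: each newline opens a line charged 35, and the first non-newline character of a line downgrades it to 25.
import Mathlib
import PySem

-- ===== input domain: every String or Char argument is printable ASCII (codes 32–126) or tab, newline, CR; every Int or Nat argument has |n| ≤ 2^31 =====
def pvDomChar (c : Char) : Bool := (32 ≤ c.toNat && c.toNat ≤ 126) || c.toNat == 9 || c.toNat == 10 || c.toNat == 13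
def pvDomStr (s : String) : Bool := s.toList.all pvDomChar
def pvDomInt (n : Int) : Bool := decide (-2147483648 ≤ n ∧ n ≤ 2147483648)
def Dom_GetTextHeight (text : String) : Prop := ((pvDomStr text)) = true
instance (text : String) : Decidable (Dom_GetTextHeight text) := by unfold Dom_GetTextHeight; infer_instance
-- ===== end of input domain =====

-- ===== PORT A =====
-- B replaces A's split-into-lines + per-line loop by a single character-level
-- state machine; equivalence of the two traversals is proved below.
def GetTextHeight (text : String) : Int :=
  let lines : List String := (PySem.Str.split? text "\n").getD []
  lines.foldl (fun height line => if line == "" then height + 35 else height + 25) 0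

-- ===== PORT B =====
def GetTextHeight_alt (text : String) : Int :=
  (text.toList.foldl
    (fun (st : Int × Bool) ch =>
      if ch = '\n' then (st.1 + 35, true)
      else if st.2 then (st.1 - 10, false) else st)
    (35, true)).1

-- ===== PRECONDITION & SPEC =====
def Spec_GetTextHeight (text : String) (out : Int) : Prop := out = GetTextHeight_alt text
instance (text : String) (out : Int) : Decidable (Spec_GetTextHeight text out) := by unfold Spec_GetTextHeight; infer_instance

-- ===== CLAIM (what is proved, stated in full; the proofs are below) =====
def Claim_equal_GetTextHeight : Prop := ∀ (text : String), Dom_GetTextHeight text → Spec_GetTextHeight text (GetTextHeight text)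

-- ===== LEMMAS AND PROOFS =====

-- structural reference splitter on '\n' (cur = reversed current chunk)
def pvSp (cur : List Char) : List Char → List (List Char)
  | [] => [cur.reverse]
  | c :: rest => if c = '\n' then cur.reverse :: pvSp [] rest else pvSp (c :: cur) rest

theorem pv_splitOn_go (fuel : Nat) : ∀ (l cur : List Char) (acc : List (List Char)),
    l.length < fuel →
    PySem.Chars.splitOn.go ['\n'] fuel l cur acc = acc.reverse ++ pvSp cur l := by
  induction fuel with
  | zero => intro l cur acc h; omega
  | succ fuel ih =>
    intro l cur acc h
    cases l with
    | nil => simp [PySem.Chars.splitOn.go, pvSp]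
    | cons c rest =>
      simp only [PySem.Chars.splitOn.go]
      by_cases hc : c = '\n'
      · subst hc
        have hp : (['\n'] : List Char).isPrefixOf ('\n' :: rest) = true := by
          simp [List.isPrefixOf]
        rw [hp]
        simp only [if_true, List.length_cons, List.drop_succ_cons, List.length_nil, List.drop_zero]
        rw [ih rest [] (cur.reverse :: acc) (by simp at h; omega)]
        simp [pvSp]
      · have hp : (['\n'] : List Char).isPrefixOf (c :: rest) = false := by
          simp [List.isPrefixOf]
          exact fun he => hc he.symm
        rw [hp]
        simp only [Bool.false_eq_true, if_false]
        rw [ih rest (c :: cur) acc (by simp at h; omega)]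
        simp [pvSp, hc]

theorem pv_splitOn_eq (l : List Char) :
    PySem.Chars.splitOn l ['\n'] = pvSp [] l := by
  unfold PySem.Chars.splitOn
  rw [pv_splitOn_go (l.length + 1) l [] [] (by omega)]
  simp

-- A's per-line charge, on char lists
def pvH (lines : List (List Char)) : Int :=
  lines.foldl (fun h cs => if cs = [] then h + 35 else h + 25) 0

theorem pvH_shift (lines : List (List Char)) (a : Int) :
    lines.foldl (fun h cs => if cs = [] then h + 35 else h + 25) a = a + pvH lines := by
  induction lines generalizing a with
  | nil => simp [pvH]
  | cons x xs ih =>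
    simp only [pvH, List.foldl_cons]
    rw [ih, ih]
    split_ifs <;> omega

-- B's scan computes A's total over the reference split
theorem pv_scan_eq (l : List Char) : ∀ (h : Int) (cur : List Char) (e : Bool),
    e = decide (cur = []) →
    (l.foldl
      (fun (st : Int × Bool) ch =>
        if ch = '\n' then (st.1 + 35, true)
        else if st.2 then (st.1 - 10, false) else st)
      (h, e)).1
      = h + pvH (pvSp cur l) - (if cur = [] then 35 else 25) := by
  induction l with
  | nil =>
    intro h cur e he
    by_cases hc : cur = [] <;> simp [pvSp, pvH, hc]
  | cons c rest ih =>
    intro h cur e he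
    simp only [List.foldl_cons]
    by_cases hc : c = '\n'
    · subst hc
      simp only [if_pos trivial]
      rw [ih (h + 35) [] true (by simp)]
      have hps : pvSp cur ('\n' :: rest) = cur.reverse :: pvSp [] rest := by
        simp [pvSp]
      rw [hps]
      have hph : pvH (cur.reverse :: pvSp [] rest)
          = (if cur = [] then (35:Int) else 25) + pvH (pvSp [] rest) := by
        conv_lhs => rw [pvH]
        rw [List.foldl_cons, pvH_shift]
        simp only [List.reverse_eq_nil_iff]
        split_ifs <;> omega
      rw [hph]
      simp only [if_pos trivial]
      split_ifs <;> omega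
    · rw [if_neg hc]
      by_cases hcur : cur = []
      · rw [he, if_pos (by simp [hcur])]
        rw [ih (h - 10) (c :: cur) false (by simp)]
        simp only [pvSp, if_neg hc]
        rw [if_neg (List.cons_ne_nil c cur), if_pos hcur]
        omega
      · rw [he, if_neg (by simp [hcur])]
        rw [ih h (c :: cur) (decide (cur = [])) (by simp [hcur])]
        simp only [pvSp, if_neg hc]
        rw [if_neg hcur, if_neg (List.cons_ne_nil c cur)]

theorem GetTextHeight_spec : Claim_equal_GetTextHeight := by
  intro text _
  unfold Spec_GetTextHeight GetTextHeight GetTextHeight_alt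
  have hsplit : PySem.Str.split? text "\n"
      = some ((pvSp [] text.toList).map String.ofList) := by
    simp [PySem.Str.split?, PySem.Chars.split?, pv_splitOn_eq]
  rw [hsplit]
  simp only [Option.getD_some, List.foldl_map]
  have hA : (pvSp [] text.toList).foldl
      (fun (height : Int) cs => if String.ofList cs == "" then height + 35 else height + 25) 0
      = pvH (pvSp [] text.toList) := by
    unfold pvH
    congr 1
    funext hgt cs
    have : (String.ofList cs == "") = decide (cs = []) := by
      have h : String.ofList cs = "" ↔ cs = [] := by
        constructor
        · intro h; have := congrArg String.toList h; simpa using this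
        · rintro rfl; rfl
      by_cases hc : cs = []
      · subst hc; rfl
      · simp only [hc, decide_false]
        rw [beq_eq_false_iff_ne]
        exact fun he => hc (h.mp he)
    simp [this]
  rw [hA]
  rw [pv_scan_eq text.toList 35 [] true (by simp)]
  simp
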